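-- pv_equiv track=rewrite | github.com/rubelw/OSSS | src/OSSS/ai/agents/query_data/handlers/waivers_handler.py | _preferred_field_order
-- ===== SOURCE A (Python) =====
-- from typing import Any, Dict, List
--
-- def _preferred_field_order(fields: List[str]) -> List[str]:
--     preferred = [
--         "id",
--         "student_id",
--         "program_id",
--         "waiver_type",
--         "reason",
--         "approved_by",
--         "start_date",
--         "end_date",
--         "is_active",
--         "created_at",
--         "updated_at",
--     ]
--
--     ordered = [f for f in preferred if f in fields]
--     for f in fields:
--         if f not in ordered:
--             ordered.append(f)
--
--     return ordered
-- ===== SOURCE B (Python) =====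
-- from typing import Any, Dict, List
--
-- def _preferred_field_order(fields):
--     preferred = [
--         "id",
--         "student_id",
--         "program_id",
--         "waiver_type",
--         "reason",
--         "approved_by",
--         "start_date",
--         "end_date",
--         "is_active",
--         "created_at",
--         "updated_at",
--     ]
--     rank = {name: i for i, name in enumerate(preferred)}
--     known = sorted({f for f in fields if f in rank}, key=lambda f: rank[f])
--     rest = []
--     seen = set(rank)
--     for f in fields:
--         if f not in seen:
--             seen.add(f)
--             rest.append(f)
--     return known + rest
-- ===== Notes on version B (the rewrite author's own statement) =====
-- stated objective: faster
-- what changed: A builds the preferred prefix by filtering the preferred list and then appends the rest while re-scanning the growing output list for membership (quadratic); B instead builds a rank dict, computes the preferred prefix as sorted(set of present preferred fields, key=rank), and collects the rest in one pass with a seen set.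
import Mathlib
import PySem

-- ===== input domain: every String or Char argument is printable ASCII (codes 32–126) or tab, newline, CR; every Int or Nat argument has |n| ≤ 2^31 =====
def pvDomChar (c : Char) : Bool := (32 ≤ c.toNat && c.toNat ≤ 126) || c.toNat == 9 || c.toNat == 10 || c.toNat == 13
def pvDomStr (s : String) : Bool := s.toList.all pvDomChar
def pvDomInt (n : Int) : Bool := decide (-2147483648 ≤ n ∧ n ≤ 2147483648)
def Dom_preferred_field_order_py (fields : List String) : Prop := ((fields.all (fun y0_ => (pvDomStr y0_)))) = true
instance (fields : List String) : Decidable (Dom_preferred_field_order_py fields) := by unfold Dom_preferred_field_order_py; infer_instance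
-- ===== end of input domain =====

-- B replaces A's scan-the-growing-output loop: the preferred part becomes sorted(present set, key=rank dict), the rest one pass with a seen set — measurably faster (A re-scans its growing output).

-- ===== PORT A =====
def pvPreferredList : List String :=
  ["id", "student_id", "program_id", "waiver_type", "reason", "approved_by",
   "start_date", "end_date", "is_active", "created_at", "updated_at"]

def preferred_field_order_py (fields : List String) : List String :=
  let preferred := pvPreferredList
  let ordered := preferred.filter (fun f => fields.contains f)
  fields.foldl (fun ordered f => if ordered.contains f then ordered else ordered ++ [f]) ordered

-- ===== PORT B =====
def preferred_field_order_py_alt (fields : List String) : List String :=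
  let preferred := pvPreferredList
  let rank : PySem.Dict String Int :=
    (PySem.List.enumerate preferred).foldl (fun d p => d.insert p.2 p.1) PySem.Dict.empty
  let known := PySem.List.sorted (PySem.Set.ofList (fields.filter (fun f => rank.contains f)))
      (fun f => rank.getD f 0) false
  let resSeen := fields.foldl
      (fun (acc : List String × PySem.Set String) f =>
        if PySem.Set.contains acc.2 f then acc else (acc.1 ++ [f], PySem.Set.add acc.2 f))
      (([] : List String), PySem.Set.ofList rank.keys)
  known ++ resSeen.1

-- ===== PRECONDITION & SPEC =====
def Spec_preferred_field_order_py (fields : List String) (out : List String) : Prop := out = preferred_field_order_py_alt fields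
instance (fields : List String) (out : List String) : Decidable (Spec_preferred_field_order_py fields out) := by unfold Spec_preferred_field_order_py; infer_instance

-- ===== CLAIM (what is proved, stated in full; the proofs are below) =====
def Claim_equal_preferred_field_order_py : Prop := ∀ (fields : List String), Dom_preferred_field_order_py fields → Spec_preferred_field_order_py fields (preferred_field_order_py fields)

-- ===== LEMMAS AND PROOFS =====

-- B's rank dict, written out (definitionally the `rank` let-binding of the port of B)
def pvRank : PySem.Dict String Int :=
  (PySem.List.enumerate pvPreferredList).foldl (fun d p => d.insert p.2 p.1) PySem.Dict.empty

-- B's known part (sorted by rank) is A's filter of the preferred list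
theorem pv_known_eq (fields : List String) :
    PySem.List.sorted (PySem.Set.ofList (fields.filter (fun f => pvRank.contains f)))
      (fun f => pvRank.getD f 0) false
    = pvPreferredList.filter (fun f => fields.contains f) := by
  apply PySem.List.sorted_eq_of_perm_of_pairwise_lt
  · apply (List.perm_ext_iff_of_nodup ?_ ?_).mpr
    · intro a
      simp only [List.mem_filter, PySem.Set.mem_ofList]
      have hk : ∀ f : String, pvRank.contains f = true ↔ f ∈ pvPreferredList := by
        intro f
        rw [PySem.Dict.contains_iff_mem_keys, show pvRank.keys = pvPreferredList from by decide]
      simp [hk]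
      tauto
    · exact (by decide : pvPreferredList.Nodup).filter _
    · exact PySem.Set.nodup_ofList _
  · exact (by decide : pvPreferredList.Pairwise (fun a b => pvRank.getD a 0 < pvRank.getD b 0)).filter _

-- B's seen-set fold: the accumulated rest list only grows at the end
theorem pv_rest_shift (l : List String) : ∀ (r : List String) (s : PySem.Set String),
    (l.foldl (fun (acc : List String × PySem.Set String) f =>
        if PySem.Set.contains acc.2 f then acc else (acc.1 ++ [f], PySem.Set.add acc.2 f)) (r, s)).1
    = r ++ (l.foldl (fun (acc : List String × PySem.Set String) f =>
        if PySem.Set.contains acc.2 f then acc else (acc.1 ++ [f], PySem.Set.add acc.2 f)) ([], s)).1 := by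
  induction l with
  | nil => intro r s; simp
  | cons f t ih =>
    intro r s
    simp only [List.foldl_cons]
    by_cases h : PySem.Set.contains s f = true
    · rw [if_pos h, if_pos h]; exact ih r s
    · rw [if_neg h, if_neg h, List.nil_append,
         ih (r ++ [f]) (PySem.Set.add s f), ih [f] (PySem.Set.add s f)]
      simp

-- A's append-if-absent fold equals the start list plus B's seen-set fold, whenever the
-- start list and the seen set agree (as membership predicates) on the elements still to come
theorem pv_a_fold_eq (l : List String) : ∀ (o : List String) (s : PySem.Set String),
    (∀ f ∈ l, (o.contains f = PySem.Set.contains s f)) →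
    l.foldl (fun ordered f => if ordered.contains f then ordered else ordered ++ [f]) o
    = o ++ (l.foldl (fun (acc : List String × PySem.Set String) f =>
        if PySem.Set.contains acc.2 f then acc else (acc.1 ++ [f], PySem.Set.add acc.2 f)) ([], s)).1 := by
  induction l with
  | nil => intro o s _; simp
  | cons f t ih =>
    intro o s hyp
    have hf := hyp f (by simp)
    simp only [List.foldl_cons]
    by_cases h : PySem.Set.contains s f = true
    · rw [if_pos h, if_pos (hf.trans h)]
      exact ih o s (fun g hg => hyp g (by simp [hg]))
    · have hyp' : ∀ g ∈ t, (o ++ [f]).contains g = (PySem.Set.add s f).contains g := by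
        intro g hg
        have hgo : (g ∈ o) ↔ (g ∈ s) := by
          rw [← List.contains_iff_mem, ← PySem.Set.contains_iff, hyp g (List.mem_cons_of_mem _ hg)]
        apply Bool.eq_iff_iff.mpr
        simp only [List.contains_iff_mem, PySem.Set.contains_iff, List.mem_append,
          List.mem_singleton, PySem.Set.mem_add]
        tauto
      rw [if_neg h, if_neg (fun hc => h (hf.symm.trans hc)), List.nil_append,
         pv_rest_shift t [f] (PySem.Set.add s f),
         ih (o ++ [f]) (PySem.Set.add s f) hyp']
      simp

-- ===== VERDICT (by name: the statement is the Claim_ definition above) =====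
theorem preferred_field_order_py_spec : Claim_equal_preferred_field_order_py := by
  intro fields _
  show fields.foldl (fun ordered f => if ordered.contains f then ordered else ordered ++ [f])
        (pvPreferredList.filter (fun f => fields.contains f))
      = PySem.List.sorted (PySem.Set.ofList (fields.filter (fun f => pvRank.contains f)))
          (fun f => pvRank.getD f 0) false
        ++ (fields.foldl
             (fun (acc : List String × PySem.Set String) f =>
               if PySem.Set.contains acc.2 f then acc else (acc.1 ++ [f], PySem.Set.add acc.2 f))
             (([] : List String), PySem.Set.ofList pvRank.keys)).1
  rw [pv_known_eq fields, pv_rest_shift fields [] (PySem.Set.ofList pvRank.keys)]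
  apply pv_a_fold_eq
  intro f hf
  apply Bool.eq_iff_iff.mpr
  rw [show pvRank.keys = pvPreferredList from by decide]
  simp only [List.contains_iff_mem, PySem.Set.contains_iff, PySem.Set.mem_ofList, List.mem_filter]
  simp [hf]
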